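-- pv_equiv track=rewrite | github.com/FrichXi/funeral-cli | funeralai/auth.py | replace_vote_provider
-- ===== SOURCE A (Python) =====
-- def replace_vote_provider(
--     providers: list[str],
--     old_provider: str,
--     new_provider: str,
-- ) -> list[str]:
--     """Replace one vote provider while preserving order and removing duplicates."""
--     replaced = False
--     updated: list[str] = []
--     for provider in providers:
--         value = provider
--         if not replaced and provider == old_provider:
--             value = new_provider
--             replaced = True
--         if value not in updated:
--             updated.append(value)
--     if not replaced and new_provider not in updated:
--         updated.append(new_provider)
--     return updated
-- ===== SOURCE B (Python) =====
-- def replace_vote_provider(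
--     providers: list[str],
--     old_provider: str,
--     new_provider: str,
-- ) -> list[str]:
--     """Replace one vote provider while preserving order and removing duplicates."""
--     try:
--         idx = providers.index(old_provider)
--         transformed = providers[:idx] + [new_provider] + providers[idx + 1:]
--     except ValueError:
--         transformed = providers + [new_provider]
--     result: list[str] = []
--     seen: set[str] = set()
--     for provider in transformed:
--         if provider not in seen:
--             seen.add(provider)
--             result.append(provider)
--     return result
-- ===== Notes on version B (the rewrite author's own statement) =====
-- stated objective: alternative
-- what changed: A's single merged replace-and-dedup loop (a 'replaced' flag plus a linear 'value not in updated' scan per element) is split into locate-and-rebuild via list.index/slicing followed by a separate set-based order-preserving dedup pass.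
import Mathlib
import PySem

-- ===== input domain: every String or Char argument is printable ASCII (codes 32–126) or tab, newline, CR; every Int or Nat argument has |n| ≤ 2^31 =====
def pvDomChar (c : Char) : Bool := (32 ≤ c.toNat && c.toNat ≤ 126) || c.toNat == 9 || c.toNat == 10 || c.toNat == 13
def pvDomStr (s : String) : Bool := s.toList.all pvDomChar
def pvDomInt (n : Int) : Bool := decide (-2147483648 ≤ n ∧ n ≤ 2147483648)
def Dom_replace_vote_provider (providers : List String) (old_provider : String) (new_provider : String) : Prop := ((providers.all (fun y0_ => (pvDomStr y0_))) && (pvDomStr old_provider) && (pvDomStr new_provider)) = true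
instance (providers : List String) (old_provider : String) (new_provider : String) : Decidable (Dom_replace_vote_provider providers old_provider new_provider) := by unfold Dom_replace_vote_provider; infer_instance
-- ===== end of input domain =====

-- B replaces A's merged replace-and-dedup loop with locate/slice-rebuild followed by a separate seen-set dedup pass; proved to return the same list.


-- ===== PORT A =====
-- one iteration of A's loop body (st = (replaced, updated))
def pvStepA (old_provider new_provider : String) (st : Bool × List String) (provider : String) :
    Bool × List String :=
  let value := if !st.1 && provider == old_provider then new_provider else provider
  let replaced := if !st.1 && provider == old_provider then true else st.1
  let updated := if st.2.contains value then st.2 else st.2 ++ [value]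
  (replaced, updated)

def replace_vote_provider (providers : List String) (old_provider : String) (new_provider : String) : List String :=
  -- literal port of A: one pass with a 'replaced' flag, deduplicating as it goes
  let st := providers.foldl (pvStepA old_provider new_provider) (false, [])
  if !st.1 && !st.2.contains new_provider then st.2 ++ [new_provider] else st.2

-- ===== PORT B =====
-- one iteration of B's dedup loop body (st = (seen, result))
def pvStepB (st : PySem.Set String × List String) (provider : String) :
    PySem.Set String × List String :=
  if PySem.Set.contains st.1 provider then st
  else (PySem.Set.add st.1 provider, st.2 ++ [provider])

def replace_vote_provider_alt (providers : List String) (old_provider : String) (new_provider : String) : List String :=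
  -- literal port of B: locate/rebuild with index and slices, then a seen-set dedup pass
  let transformed := match PySem.List.index? providers old_provider with
    | some idx =>
        PySem.List.slice providers none (some (idx : Int)) ++ [new_provider] ++
          PySem.List.slice providers (some ((idx : Int) + 1)) none
    | none => providers ++ [new_provider]
  let st := transformed.foldl pvStepB (PySem.Set.empty, [])
  st.2

-- ===== PRECONDITION & SPEC =====
def Spec_replace_vote_provider (providers : List String) (old_provider : String) (new_provider : String) (out : List String) : Prop := out = replace_vote_provider_alt providers old_provider new_provider
instance (providers : List String) (old_provider : String) (new_provider : String) (out : List String) : Decidable (Spec_replace_vote_provider providers old_provider new_provider out) := by unfold Spec_replace_vote_provider; infer_instance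

-- ===== CLAIM (what is proved, stated in full; the proofs are below) =====
def Claim_equal_replace_vote_provider : Prop := ∀ (providers : List String) (old_provider : String) (new_provider : String), Dom_replace_vote_provider providers old_provider new_provider → Spec_replace_vote_provider providers old_provider new_provider (replace_vote_provider providers old_provider new_provider)

-- ===== LEMMAS AND PROOFS =====

-- pvDed acc xs: order-preserving dedup of xs relative to accumulator acc (shape shared by both loops)
def pvDed (acc : List String) (xs : List String) : List String :=
  xs.foldl (fun u v => if u.contains v then u else u ++ [v]) acc

theorem pvDed_append (acc : List String) (xs ys : List String) :
    pvDed acc (xs ++ ys) = pvDed (pvDed acc xs) ys := by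
  simp [pvDed, List.foldl_append]

theorem pvDed_cons (acc : List String) (x : String) (xs : List String) :
    pvDed acc (x :: xs) = pvDed (if acc.contains x then acc else acc ++ [x]) xs := by
  simp only [pvDed, List.foldl_cons]

-- B's seen-set/result pair: both components stay equal and compute pvDed
theorem pvB_fold (xs : List String) (acc : List String) :
    xs.foldl pvStepB (acc, acc) = (pvDed acc xs, pvDed acc xs) := by
  induction xs generalizing acc with
  | nil => simp [pvDed]
  | cons x xs ih =>
    rw [List.foldl_cons, pvDed_cons]
    have hstep : pvStepB (acc, acc) x
        = ((if acc.contains x then acc else acc ++ [x]),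
           (if acc.contains x then acc else acc ++ [x])) := by
      simp only [pvStepB, PySem.Set.contains, PySem.Set.add]
      split_ifs <;> simp_all
    rw [hstep, ih]

-- A's loop once 'replaced' is true: it is pure dedup
theorem pvA_fold_true (old_provider new_provider : String) (xs : List String) (u : List String) :
    xs.foldl (pvStepA old_provider new_provider) (true, u) = (true, pvDed u xs) := by
  induction xs generalizing u with
  | nil => simp [pvDed]
  | cons x xs ih =>
    rw [List.foldl_cons, pvDed_cons]
    have hstep : pvStepA old_provider new_provider (true, u) x
        = (true, if u.contains x then u else u ++ [x]) := by
      simp [pvStepA]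
    rw [hstep, ih]

-- A's loop while old_provider has not been seen: also pure dedup, flag stays false
theorem pvA_fold_false (old_provider new_provider : String) (xs : List String) (u : List String)
    (hx : old_provider ∉ xs) :
    xs.foldl (pvStepA old_provider new_provider) (false, u) = (false, pvDed u xs) := by
  induction xs generalizing u with
  | nil => simp [pvDed]
  | cons x xs ih =>
    have hne : (x == old_provider) = false := by
      simp only [List.mem_cons, not_or] at hx
      simpa [beq_iff_eq] using fun h => hx.1 h.symm
    rw [List.foldl_cons, pvDed_cons]
    have hstep : pvStepA old_provider new_provider (false, u) x
        = (false, if u.contains x then u else u ++ [x]) := by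
      simp [pvStepA, hne]
    rw [hstep, ih _ (fun hm => hx (List.mem_cons_of_mem _ hm))]

theorem pv_main (providers : List String) (old_provider new_provider : String) :
    replace_vote_provider providers old_provider new_provider
      = replace_vote_provider_alt providers old_provider new_provider := by
  cases hidx : PySem.List.index? providers old_provider with
  | none =>
    have hmem : old_provider ∉ providers :=
      (PySem.List.index?_eq_none_iff providers old_provider).1 hidx
    simp only [replace_vote_provider, replace_vote_provider_alt, hidx, PySem.Set.empty]
    rw [pvA_fold_false old_provider new_provider providers [] hmem, pvB_fold, pvDed_append]
    by_cases h : (pvDed [] providers).contains new_provider = true <;> simp [h, pvDed]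
  | some idx =>
    obtain ⟨pre, suf, hps, hlen, hpre⟩ :=
      (PySem.List.index?_eq_some_iff providers old_provider idx).1 hidx
    subst hps hlen
    simp only [replace_vote_provider, replace_vote_provider_alt, hidx, PySem.Set.empty]
    rw [PySem.List.slice_to_natCast]
    have h1 : ((pre.length : Int) + 1) = ((pre.length + 1 : Nat) : Int) := by push_cast; ring
    rw [h1, PySem.List.slice_from_natCast]
    have hdrop : (pre ++ old_provider :: suf).drop (pre.length + 1) = suf := by
      simp [List.drop_append]
    rw [List.take_left, hdrop, pvB_fold, List.foldl_append,
      pvA_fold_false old_provider new_provider pre [] hpre, List.foldl_cons]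
    have hstep : pvStepA old_provider new_provider (false, pvDed [] pre) old_provider
        = (true, if (pvDed [] pre).contains new_provider then pvDed [] pre
                 else pvDed [] pre ++ [new_provider]) := by
      simp [pvStepA]
    have hmid : (if (pvDed [] pre).contains new_provider then pvDed [] pre
                 else pvDed [] pre ++ [new_provider]) = pvDed (pvDed [] pre) [new_provider] := by
      simp only [pvDed, List.foldl_cons, List.foldl_nil]
    rw [hstep, hmid, pvA_fold_true, ← pvDed_append, ← pvDed_append]
    simp

-- ===== VERDICT (by name: the statement is the Claim_ definition above) =====
theorem replace_vote_provider_spec : Claim_equal_replace_vote_provider := by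
  intro providers old_provider new_provider _
  unfold Spec_replace_vote_provider
  exact pv_main providers old_provider new_provider
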